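-- pv_equiv track=rewrite | github.com/DarkMatro/LeetCode_Solutions | Hash-Table/Making-File-Names-Unique.py | getFolderNames
-- ===== SOURCE A (Python) =====
-- def getFolderNames(names: list[str]) -> list[str]:
--     """
--     ID: 1487
--     Tags:   Array, Hash Table, String
--     Time:   O(N)
--     Memory: O(N)
--
--     Task
--     ----------
--     Given an array of strings names of size n. You will create n folders in your file system such
--     that, at the ith minute, you will create a folder with the name names[i].
--
--     Since two files cannot have the same name, if you enter a folder name that was previously used,
--     the system will have a suffix addition to its name in the form of (k), where, k is the smallest
--     positive integer such that the obtained name remains unique.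
--
--     Return an array of strings of length n where ans[i] is the actual name the system will assign
--     to the ith folder when you create it.
--
--     Parameters
--     ----------
--     names: list[str]
--
--     Returns
--     -------
--     out : list[str]
--
--     Examples
--     --------
--     >>> getFolderNames(["pes","fifa","gta","pes(2019)"])
--     ['pes', 'fifa', 'gta', 'pes(2019)']
--
--     Explanation: Let's see how the file system creates folder names:
--     "pes" --> not assigned before, remains "pes"
--     "fifa" --> not assigned before, remains "fifa"
--     "gta" --> not assigned before, remains "gta"
--     "pes(2019)" --> not assigned before, remains "pes(2019)"
--
--     >>> getFolderNames(["gta","gta(1)","gta","avalon"])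
--     ['gta', 'gta(1)', 'gta(2)', 'avalon']
--
--     Explanation: Let's see how the file system creates folder names:
--     "gta" --> not assigned before, remains "gta"
--     "gta(1)" --> not assigned before, remains "gta(1)"
--     "gta" --> the name is reserved, system adds (k), since "gta(1)" is also reserved, systems put k = 2. it becomes "gta(2)"
--     "avalon" --> not assigned before, remains "avalon"
--
--     >>> getFolderNames(["onepiece","onepiece(1)","onepiece(2)","onepiece(3)","onepiece"])
--     ['onepiece', 'onepiece(1)', 'onepiece(2)', 'onepiece(3)', 'onepiece(4)']
--
--     Explanation: When the last folder is created, the smallest positive valid k is 4, and it becomes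
--     "onepiece(4)".
--     """
--     name_count = {}  # To track the next suffix for each name
--     result = []
--
--     for name in names:
--         if name not in name_count:
--             # If name is not used, add it to the result
--             result.append(name)
--             name_count[name] = 1  # Set the next available suffix for this name
--         else:
--             # If name is already used, find the next available suffix
--             k = name_count[name]
--             while f"{name}({k})" in name_count:
--                 k += 1
--             # Append the new unique name
--             new_name = f"{name}({k})"
--             result.append(new_name)
--             # Update the map for both the base name and the new name
--             name_count[name] = k + 1
--             name_count[new_name] = 1  # Start the count for the new name
--     return result
-- ===== SOURCE B (Python) =====
-- def getFolderNames(names: list[str]) -> list[str]: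
--     used = set()  # all names assigned so far; no per-name next-suffix cache
--     out = []
--     for name in names:
--         new = name
--         if name in used:
--             # smallest k with name(k) free; one of 1..len(used)+1 is free (pigeonhole)
--             new = next(f"{name}({k})" for k in range(1, len(used) + 2)
--                        if f"{name}({k})" not in used)
--         out.append(new)
--         used.add(new)
--     return out
-- ===== Notes on version B (the rewrite author's own statement) =====
-- stated objective: simpler
-- what changed: B drops A's dict cache of next-suffix counters and keeps only a set of assigned names; on a collision it searches the bounded candidate range 1..len(used)+1 for the first free suffix (pigeonhole guarantees one), instead of A's unbounded while-loop resumed from a cached counter.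
import Mathlib
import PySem

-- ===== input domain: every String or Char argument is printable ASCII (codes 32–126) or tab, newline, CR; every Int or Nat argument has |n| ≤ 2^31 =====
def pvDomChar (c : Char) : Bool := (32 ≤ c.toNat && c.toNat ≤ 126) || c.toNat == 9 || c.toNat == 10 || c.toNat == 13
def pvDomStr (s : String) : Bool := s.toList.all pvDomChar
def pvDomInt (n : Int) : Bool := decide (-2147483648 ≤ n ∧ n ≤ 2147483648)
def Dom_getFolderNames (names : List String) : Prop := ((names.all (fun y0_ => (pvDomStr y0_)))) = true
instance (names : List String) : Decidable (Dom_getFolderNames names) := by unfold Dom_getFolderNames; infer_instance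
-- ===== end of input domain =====

-- B drops A's dict of next-suffix counters: it keeps only the set of assigned names and, on a
-- collision, searches the bounded range 1..len(used)+1 for the first free suffix (objective: simpler).

-- ===== PORT A =====
-- the f-string f"{name}({k})", shared by both Pythons
def pvMkName (name : String) (k : Int) : String :=
  name ++ "(" ++ PySem.Int.toStr k ++ ")"

-- A's `while f"{name}({k})" in name_count: k += 1`; the fuel argument only makes the
-- recursion total: the proofs below show a free suffix is found before it runs out
def pvFindA (d : PySem.Dict String Int) (name : String) (k : Int) : Nat → Int
  | 0 => k
  | fuel + 1 => if d.contains (pvMkName name k) then pvFindA d name (k + 1) fuel else k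

def pvStepA (s : PySem.Dict String Int × List String) (name : String) :
    PySem.Dict String Int × List String :=
  if s.1.contains name = false then
    (s.1.insert name 1, s.2 ++ [name])
  else
    let k := pvFindA s.1 name (s.1.getD name 0) (s.1.keys.length + 1)
    let nn := pvMkName name k
    ((s.1.insert name (k + 1)).insert nn 1, s.2 ++ [nn])

def getFolderNames (names : List String) : List String :=
  (names.foldl pvStepA (PySem.Dict.empty, [])).2

-- ===== PORT B =====
-- B's `next(f"{name}({k})" for k in range(1, len(used) + 2) if f"{name}({k})" not in used)`;
-- the generator always yields (pigeonhole, proved below), so the `none` arm — Python's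
-- StopIteration — is unreachable
def pvPickB (used : PySem.Set String) (name : String) : String :=
  match (PySem.List.pyRange 1 (PySem.Set.len used + 2) 1).find?
      (fun k => !(PySem.Set.contains used (pvMkName name k))) with
  | some k => pvMkName name k
  | none => name

-- the per-iteration value `new`
def pvNewB (used : PySem.Set String) (name : String) : String :=
  if PySem.Set.contains used name then pvPickB used name else name

-- the `for name in names` loop as structural recursion carrying the `used` set
def pvGoB (used : PySem.Set String) : List String → List String
  | [] => []
  | name :: rest => pvNewB used name :: pvGoB (PySem.Set.add used (pvNewB used name)) rest

def getFolderNames_alt (names : List String) : List String :=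
  pvGoB PySem.Set.empty names

-- ===== PRECONDITION & SPEC =====
def Spec_getFolderNames (names : List String) (out : List String) : Prop := out = getFolderNames_alt names
instance (names : List String) (out : List String) : Decidable (Spec_getFolderNames names out) := by unfold Spec_getFolderNames; infer_instance

-- ===== CLAIM (what is proved, stated in full; the proofs are below) =====
def Claim_equal_getFolderNames : Prop := ∀ (names : List String), Dom_getFolderNames names → Spec_getFolderNames names (getFolderNames names)

-- ===== LEMMAS AND PROOFS =====

-- str(n) in Lean is built on Nat.toDigits; pvDigits is its base-10 recursion, used to
-- prove that distinct suffix numbers give distinct candidate names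
def pvDigits (n : Nat) : List Char :=
  if _h : n < 10 then [Nat.digitChar n]
  else pvDigits (n / 10) ++ [Nat.digitChar (n % 10)]
decreasing_by exact Nat.div_lt_self (by omega) (by omega)

theorem pvDigits_lt {n : Nat} (h : n < 10) : pvDigits n = [Nat.digitChar n] := by
  rw [pvDigits, dif_pos h]

theorem pvDigits_ge {n : Nat} (h : ¬ n < 10) :
    pvDigits n = pvDigits (n / 10) ++ [Nat.digitChar (n % 10)] := by
  rw [pvDigits, dif_neg h]

theorem pvDigits_ne_nil (n : Nat) : pvDigits n ≠ [] := by
  by_cases h : n < 10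
  · rw [pvDigits_lt h]; simp
  · rw [pvDigits_ge h]; simp

theorem pvDigitChar_inj {a b : Nat} (ha : a < 10) (hb : b < 10)
    (h : Nat.digitChar a = Nat.digitChar b) : a = b := by
  interval_cases a <;> interval_cases b <;> simp_all [Nat.digitChar]

theorem pvToDigitsCore_shift (b f : Nat) :
    ∀ (n : Nat) (l : List Char), Nat.toDigitsCore b f n l = Nat.toDigitsCore b f n [] ++ l := by
  induction f with
  | zero => intro n l; simp [Nat.toDigitsCore]
  | succ f ih =>
    intro n l
    simp only [Nat.toDigitsCore]
    by_cases h : n / b = 0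
    · simp [h]
    · simp only [h, if_false]
      rw [ih (n / b) (Nat.digitChar (n % b) :: l), ih (n / b) [Nat.digitChar (n % b)]]
      simp

theorem pvToDigitsCore_eq_pvDigits : ∀ (f n : Nat), n < f →
    Nat.toDigitsCore 10 f n [] = pvDigits n := by
  intro f
  induction f with
  | zero => omega
  | succ f ih =>
    intro n hn
    simp only [Nat.toDigitsCore]
    by_cases h : n / 10 = 0
    · have h10 : n < 10 := by omega
      rw [if_pos h, pvDigits_lt h10, Nat.mod_eq_of_lt h10]
    · have h10 : ¬ n < 10 := by
        intro hc; exact h (Nat.div_eq_of_lt hc)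
      rw [if_neg h, pvToDigitsCore_shift, ih (n / 10) (by omega), pvDigits_ge h10]

theorem pvToDigits_eq (n : Nat) : Nat.toDigits 10 n = pvDigits n :=
  pvToDigitsCore_eq_pvDigits (n + 1) n (by omega)

theorem pvDigits_inj : ∀ (a b : Nat), pvDigits a = pvDigits b → a = b := by
  intro a
  induction a using Nat.strong_induction_on with
  | _ a ih =>
    intro b h
    by_cases ha : a < 10 <;> by_cases hb : b < 10
    · rw [pvDigits_lt ha, pvDigits_lt hb] at h
      exact pvDigitChar_inj ha hb (by simpa using h)
    · exfalso
      rw [pvDigits_lt ha, pvDigits_ge hb] at h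
      rcases hx : pvDigits (b / 10) with _ | ⟨c, cs⟩
      · exact pvDigits_ne_nil _ hx
      · rw [hx] at h; simp at h
    · exfalso
      rw [pvDigits_ge ha, pvDigits_lt hb] at h
      rcases hx : pvDigits (a / 10) with _ | ⟨c, cs⟩
      · exact pvDigits_ne_nil _ hx
      · rw [hx] at h; simp at h
    · rw [pvDigits_ge ha, pvDigits_ge hb] at h
      obtain ⟨hpre, hlast⟩ := List.append_inj' h (by simp)
      have hquot : a / 10 = b / 10 := ih (a / 10) (Nat.div_lt_self (by omega) (by omega)) _ hpre
      have hmod : a % 10 = b % 10 :=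
        pvDigitChar_inj (Nat.mod_lt _ (by omega)) (Nat.mod_lt _ (by omega)) (by simpa using hlast)
      omega

theorem pvToChars_inj (a b : Int) (ha : 0 ≤ a) (hb : 0 ≤ b)
    (h : PySem.Int.toChars a = PySem.Int.toChars b) : a = b := by
  unfold PySem.Int.toChars at h
  rw [if_neg (by omega), if_neg (by omega), pvToDigits_eq, pvToDigits_eq] at h
  have := pvDigits_inj _ _ h
  omega

theorem pvMkName_inj (name : String) (j j' : Int) (hj : 0 ≤ j) (hj' : 0 ≤ j')
    (h : pvMkName name j = pvMkName name j') : j = j' := by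
  have ht := congrArg String.toList h
  unfold pvMkName PySem.Int.toStr at ht
  simp only [String.toList_append, String.toList_ofList, List.append_assoc] at ht
  have h1 := List.append_cancel_left (List.append_cancel_left ht)
  exact pvToChars_inj _ _ hj hj' (List.append_cancel_right h1)

-- A's while-loop expressed over the dict's key list
def pvScan (L : List String) (name : String) (k : Int) : Nat → Int
  | 0 => k
  | fuel + 1 => if pvMkName name k ∈ L then pvScan L name (k + 1) fuel else k

theorem pvFindA_eq_pvScan (d : PySem.Dict String Int) (name : String) :
    ∀ (fuel : Nat) (k : Int), pvFindA d name k fuel = pvScan d.keys name k fuel := by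
  intro fuel
  induction fuel with
  | zero => intro k; rfl
  | succ fuel ih =>
    intro k
    simp only [pvFindA, pvScan]
    by_cases h : pvMkName name k ∈ d.keys
    · rw [if_pos ((PySem.Dict.contains_iff_mem_keys d _).mpr h), if_pos h, ih]
    · rw [if_neg (fun hc => h ((PySem.Dict.contains_iff_mem_keys d _).mp hc)), if_neg h]

theorem pvScan_spec (L : List String) (name : String) :
    ∀ (fuel : Nat) (k : Int), (∃ m : Nat, m < fuel ∧ pvMkName name (k + m) ∉ L) →
      pvMkName name (pvScan L name k fuel) ∉ L ∧ k ≤ pvScan L name k fuel ∧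
      ∀ j : Int, k ≤ j → j < pvScan L name k fuel → pvMkName name j ∈ L := by
  intro fuel
  induction fuel with
  | zero => rintro k ⟨m, hm, _⟩; omega
  | succ fuel ih =>
    rintro k ⟨m, hm, hfree⟩
    simp only [pvScan]
    by_cases h : pvMkName name k ∈ L
    · rw [if_pos h]
      have hm0 : m ≠ 0 := by rintro rfl; simp at hfree; exact hfree h
      obtain ⟨hr1, hr2, hr3⟩ := ih (k + 1)
        ⟨m - 1, by omega, by
          have : (k + 1) + ((m - 1 : Nat) : Int) = k + (m : Int) := by omega
          rw [this]; exact hfree⟩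
      refine ⟨hr1, by omega, fun j hj1 hj2 => ?_⟩
      by_cases hjk : j = k
      · rwa [hjk]
      · exact hr3 j (by omega) hj2
    · rw [if_neg h]
      exact ⟨h, le_refl _, fun j h1 h2 => by omega⟩

theorem pvExists_free (L : List String) (name : String) (k : Int) (hk : 0 ≤ k) :
    ∃ m : Nat, m < L.length + 1 ∧ pvMkName name (k + m) ∉ L := by
  by_contra hc
  push Not at hc
  set C : List String := (List.range (L.length + 1)).map (fun m : Nat => pvMkName name (k + (m : Int))) with hC
  have hsub : C ⊆ L := by
    intro x hx
    rw [hC, List.mem_map] at hx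
    obtain ⟨m, hm, rfl⟩ := hx
    exact hc m (by simpa using hm)
  have hnodC : C.Nodup := by
    rw [hC]
    refine (List.nodup_range).map_on ?_
    intro a ha b hb hab
    have := pvMkName_inj name _ _ (by positivity) (by positivity) hab
    omega
  have := (hnodC.subperm hsub).length_le
  simp [hC] at this

-- B's generator: find? over range(a, a+n) returns the FIRST free suffix, provided one exists
theorem pvFindRange_spec (used : PySem.Set String) (name : String) :
    ∀ (n : Nat) (a : Int), (∃ m : Nat, m < n ∧ pvMkName name (a + m) ∉ used) →
      ∃ r, (PySem.List.pyRange a (a + n) 1).find?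
            (fun k => !(PySem.Set.contains used (pvMkName name k))) = some r ∧
        pvMkName name r ∉ used ∧ a ≤ r ∧ ∀ j : Int, a ≤ j → j < r → pvMkName name j ∈ used := by
  intro n
  induction n with
  | zero => rintro a ⟨m, hm, _⟩; omega
  | succ n ih =>
    rintro a ⟨m, hm, hfree⟩
    rw [PySem.List.pyRange_one_cons (by omega), List.find?_cons]
    by_cases h : pvMkName name a ∈ used
    · simp only [(PySem.Set.contains_iff used _).mpr h, Bool.not_true]
      have hm0 : m ≠ 0 := by rintro rfl; simp at hfree; exact hfree h
      obtain ⟨r, hr0, hr1, hr2, hr3⟩ := ih (a + 1)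
        ⟨m - 1, by omega, by
          have : (a + 1) + ((m - 1 : Nat) : Int) = a + (m : Int) := by omega
          rw [this]; exact hfree⟩
      refine ⟨r, ?_, hr1, by omega, fun j hj1 hj2 => ?_⟩
      · rw [show a + ((n + 1 : Nat) : Int) = (a + 1) + n by push_cast; ring]; exact hr0
      · by_cases hja : j = a
        · rwa [hja]
        · exact hr3 j (by omega) hj2
    · have hcb : PySem.Set.contains used (pvMkName name a) = false := by
        rw [Bool.eq_false_iff]
        exact fun hc => h ((PySem.Set.contains_iff used _).mp hc)
      simp only [hcb, Bool.not_false]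
      exact ⟨a, rfl, h, le_refl _, fun j h1 h2 => by omega⟩

-- A's dict invariant: whenever a base name is cached with next-suffix c, every
-- suffix 1 ≤ j < c is already among the assigned names (the dict's keys)
def pvInv (d : PySem.Dict String Int) : Prop :=
  d.keys.Nodup ∧ ∀ name c, d.get? name = some c →
    1 ≤ c ∧ ∀ j : Int, 1 ≤ j → j < c → pvMkName name j ∈ d.keys

theorem pvStep_main (d : PySem.Dict String Int) (res : List String) (name : String)
    (hinv : pvInv d) :
    (pvStepA (d, res) name).2 = res ++ [pvNewB d.keys name] ∧
    (pvStepA (d, res) name).1.keys = PySem.Set.add d.keys (pvNewB d.keys name) ∧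
    pvInv (pvStepA (d, res) name).1 := by
  obtain ⟨hnd, hI⟩ := hinv
  by_cases hmem : name ∈ d.keys
  · -- collision branch
    have hA : d.contains name = true := (PySem.Dict.contains_iff_mem_keys d name).mpr hmem
    have hB : PySem.Set.contains d.keys name = true := (PySem.Set.contains_iff _ name).mpr hmem
    simp only [pvStepA, pvNewB, hA, hB]
    rw [if_neg (by simp), if_pos trivial]
    -- the cached start value
    obtain ⟨c0, hc0⟩ : ∃ c0, d.get? name = some c0 := by
      have := PySem.Dict.contains_eq_isSome_get? d name
      rw [hA] at this
      exact Option.isSome_iff_exists.mp this.symm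
    obtain ⟨hc01, hc0all⟩ := hI name c0 hc0
    have hgetD : d.getD name 0 = c0 := PySem.Dict.getD_of_get?_eq_some d 0 hc0
    rw [hgetD, pvFindA_eq_pvScan]
    -- characterise A's search
    obtain ⟨hAfree, hAge, hAall⟩ := pvScan_spec d.keys name (d.keys.length + 1) c0
      (pvExists_free d.keys name c0 (by omega))
    set rA := pvScan d.keys name c0 (d.keys.length + 1) with hrA
    have hAall' : ∀ j : Int, 1 ≤ j → j < rA → pvMkName name j ∈ d.keys := by
      intro j h1 h2
      by_cases hj : j < c0
      · exact hc0all j h1 hj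
      · exact hAall j (by omega) h2
    -- characterise B's search
    obtain ⟨rB, hB0, hBfree, hBge, hBall⟩ := pvFindRange_spec d.keys name (d.keys.length + 1) 1
      (pvExists_free d.keys name 1 (by omega))
    have hpick : pvPickB d.keys name = pvMkName name rB := by
      unfold pvPickB
      rw [show PySem.Set.len d.keys + 2 = 1 + ((d.keys.length : Int) + 1) by
            simp [PySem.Set.len]; ring]
      rw [show ((d.keys.length : Int) + 1) = ((d.keys.length + 1 : Nat) : Int) by push_cast; ring]
      rw [hB0]
    have hreq : rA = rB := by
      rcases lt_trichotomy rA rB with h | h | h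
      · exact absurd (hBall rA (by omega) h) hAfree
      · exact h
      · exact absurd (hAall' rB (by omega) h) hBfree
    rw [hpick, ← hreq]
    refine ⟨rfl, ?_, ?_, ?_⟩
    · -- keys of the updated dict = Set.add d.keys nn
      rw [PySem.Dict.keys_insert_of_not_contains _ _
          (by rw [Bool.eq_false_iff]
              intro hcn
              have hm := (PySem.Dict.contains_iff_mem_keys _ _).mp hcn
              rw [PySem.Dict.keys_insert_of_contains d _ hA] at hm
              exact hAfree hm),
        PySem.Dict.keys_insert_of_contains d _ hA,
        PySem.Set.add_of_not_mem hAfree]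
    · exact PySem.Dict.nodup_keys_insert _ _ _ (PySem.Dict.nodup_keys_insert _ _ _ hnd)
    · -- the invariant for the updated dict
      intro x c hx
      have hkeys' : ((d.insert name (rA + 1)).insert (pvMkName name rA) 1).keys
          = d.keys ++ [pvMkName name rA] := by
        rw [PySem.Dict.keys_insert_of_not_contains _ _
            (by rw [Bool.eq_false_iff]
                intro hcn
                have hm := (PySem.Dict.contains_iff_mem_keys _ _).mp hcn
                rw [PySem.Dict.keys_insert_of_contains d _ hA] at hm
                exact hAfree hm),
          PySem.Dict.keys_insert_of_contains d _ hA]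
      rw [PySem.Dict.get?_insert, PySem.Dict.get?_insert] at hx
      by_cases hx1 : x = pvMkName name rA
      · rw [if_pos hx1] at hx
        have hc1 : c = 1 := by injection hx with h; omega
        subst hc1
        exact ⟨by omega, fun j h1 h2 => by omega⟩
      · rw [if_neg hx1] at hx
        by_cases hx2 : x = name
        · rw [if_pos hx2] at hx
          have hc1 : c = rA + 1 := by injection hx with h; omega
          subst hc1
          refine ⟨by omega, fun j h1 h2 => ?_⟩
          rw [hkeys', hx2]
          by_cases hj : j = rA
          · subst hj; exact List.mem_append_right _ (by simp)
          · exact List.mem_append_left _ (hAall' j h1 (by omega))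
        · rw [if_neg hx2] at hx
          obtain ⟨h1, h2⟩ := hI x c hx
          exact ⟨h1, fun j hj1 hj2 => hkeys' ▸ List.mem_append_left _ (h2 j hj1 hj2)⟩
  · -- fresh-name branch
    have hA : d.contains name = false := by
      rw [Bool.eq_false_iff]
      exact fun h' => hmem ((PySem.Dict.contains_iff_mem_keys d name).mp h')
    have hB : PySem.Set.contains d.keys name = false := by
      rw [Bool.eq_false_iff]
      exact fun h' => hmem ((PySem.Set.contains_iff _ name).mp h')
    simp only [pvStepA, pvNewB, hA, hB]
    rw [if_pos trivial, if_neg (by simp)]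
    refine ⟨rfl, ?_, ?_, ?_⟩
    · rw [PySem.Dict.keys_insert_of_not_contains _ _ hA, PySem.Set.add_of_not_mem hmem]
    · exact PySem.Dict.nodup_keys_insert _ _ _ hnd
    · intro x c hx
      rw [PySem.Dict.get?_insert] at hx
      by_cases hx1 : x = name
      · rw [if_pos hx1] at hx
        have hc1 : c = 1 := by injection hx with h; omega
        subst hc1
        exact ⟨by omega, fun j h1 h2 => by omega⟩
      · rw [if_neg hx1] at hx
        obtain ⟨h1, h2⟩ := hI x c hx
        refine ⟨h1, fun j hj1 hj2 => ?_⟩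
        rw [PySem.Dict.keys_insert_of_not_contains _ _ hA]
        exact List.mem_append_left _ (h2 j hj1 hj2)

theorem pvFold (names : List String) :
    ∀ (d : PySem.Dict String Int) (res : List String),
      pvInv d → (names.foldl pvStepA (d, res)).2 = res ++ pvGoB d.keys names := by
  induction names with
  | nil => intro d res hinv; simp [pvGoB]
  | cons name rest ih =>
    intro d res hinv
    obtain ⟨h2, h3, h4⟩ := pvStep_main d res name hinv
    have hpair : pvStepA (d, res) name =
        ((pvStepA (d, res) name).1, res ++ [pvNewB d.keys name]) := Prod.ext rfl h2
    rw [List.foldl_cons, hpair, ih _ _ h4, h3, pvGoB]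
    simp

-- ===== VERDICT (by name: the statement is the Claim_ definition above) =====
theorem getFolderNames_spec : Claim_equal_getFolderNames := by
  intro names _
  unfold Spec_getFolderNames getFolderNames getFolderNames_alt
  rw [pvFold names PySem.Dict.empty []
    ⟨PySem.Dict.nodup_keys_empty, by intro n c h; rw [PySem.Dict.get?_empty] at h; cases h⟩]
  rw [PySem.Dict.keys_empty]
  rfl
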